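-- pv_equiv track=rewrite | github.com/TimeB1729/codeforces | round 1032 (div 3)/pB.py | ourfunc
-- ===== SOURCE A (Python) =====
-- def ourfunc(t, test_cases):
--     results=[]
--     for case in test_cases:
--         n,s = case
--         res = "No"
--         count = {}
--         for i in range(n):
--             if s[i] in count.keys():
--                 count[s[i]] += 1
--             else:
--                 count[s[i]] = 1
--
--         if max(count.values()) > 2:
--             res = "Yes"
--         elif max(count.values()) == 2:
--             if s[0] != s[-1]:
--                 res = "Yes"
--             else:
--                 max_keys = [k for k,v in count.items() if v==2]
--                 if len(max_keys) > 1: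
--                     res = "Yes"
--
--         results.append(res)
--     return results
-- ===== SOURCE B (Python) =====
-- def _judge(n, s):
--     # sort the first n characters so equal characters form adjacent runs,
--     # then scan once, tracking the longest run and the number of runs of length 2
--     chars = sorted(s[i] for i in range(n))
--     longest = 0
--     pairs = 0
--     run = 0
--     prev = None
--     for c in chars:
--         if prev == c:
--             run += 1
--         else:
--             if run == 2:
--                 pairs += 1
--             run = 1
--             prev = c
--         if run > longest:
--             longest = run
--     if run == 2:
--         pairs += 1
--     if longest > 2 or (longest == 2 and (s[0] != s[-1] or pairs >= 2)):
--         return "Yes"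
--     return "No"
--
--
-- def ourfunc(t, test_cases):
--     return [_judge(n, s) for n, s in test_cases]
-- ===== Notes on version B (the rewrite author's own statement) =====
-- stated objective: alternative
-- what changed: Replaces A's hash-dict counting loop and nested if/elif cascade by sorting the first n characters and scanning the adjacent equal-character runs once, deriving the longest run and the number of length-2 runs, then one boolean decision per case.
import Mathlib
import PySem

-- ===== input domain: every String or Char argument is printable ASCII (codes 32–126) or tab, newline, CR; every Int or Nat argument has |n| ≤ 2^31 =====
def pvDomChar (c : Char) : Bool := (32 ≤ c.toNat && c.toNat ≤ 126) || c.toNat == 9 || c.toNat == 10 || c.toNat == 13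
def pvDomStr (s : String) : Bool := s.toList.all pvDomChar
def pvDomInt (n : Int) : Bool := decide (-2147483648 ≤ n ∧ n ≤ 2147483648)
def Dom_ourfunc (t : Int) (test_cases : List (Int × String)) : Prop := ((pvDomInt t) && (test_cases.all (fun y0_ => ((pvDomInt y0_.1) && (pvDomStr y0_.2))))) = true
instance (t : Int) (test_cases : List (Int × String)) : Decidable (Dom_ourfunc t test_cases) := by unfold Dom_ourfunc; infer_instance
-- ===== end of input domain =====

-- B replaces A's hash-dict counting loop and if/elif cascade by sorting the first n
-- characters and scanning the adjacent equal runs once (objective: alternative; equal value on Pre_).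

-- ===== PORT A =====
-- body of A's counting loop: 'if s[i] in count.keys(): count[s[i]] += 1 else: count[s[i]] = 1'
def pvStepA (s : String) (d : PySem.Dict Char Int) (i : Int) : PySem.Dict Char Int :=
  match PySem.Str.pyGet? s i with
  | some c => if d.contains c then d.modify c 0 (· + 1) else d.insert c 1
  | none => d           -- none = IndexError (n > len(s)); excluded by Pre_

-- one iteration of A's outer loop (body of 'for case in test_cases')
def pvCaseA (n : Int) (s : String) : String :=
  let count := (PySem.List.pyRange 0 n 1).foldl (pvStepA s) PySem.Dict.empty
  match PySem.List.max? count.values id with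
  | none => "No"        -- max([]) = ValueError (n < 1); excluded by Pre_
  | some m =>
    if m > 2 then "Yes"
    else if m = 2 then
      -- s[0] / s[-1]: both in range under Pre_, so comparing the pyGet? options is exact there
      if PySem.Str.pyGet? s 0 ≠ PySem.Str.pyGet? s (-1) then "Yes"
      else
        let max_keys := (count.items.filter (fun p => p.2 == 2)).map (·.1)
        if max_keys.length > 1 then "Yes" else "No"
    else "No"

def ourfunc (t : Int) (test_cases : List (Int × String)) : List String :=
  test_cases.foldl (fun results case => results ++ [pvCaseA case.1 case.2]) []

-- ===== PORT B =====
-- 'sorted(s[i] for i in range(n))' builds the character list index by index; an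
-- out-of-range index is IndexError = none (excluded by Pre_)
def pvGetChars (s : String) (idxs : List Int) : Option (List Char) :=
  match idxs with
  | [] => some []
  | i :: rest =>
    match PySem.Str.pyGet? s i, pvGetChars s rest with
    | some c, some cs => some (c :: cs)
    | _, _ => none

-- loop body of B's run scan; state = (longest, pairs, run, prev)
def pvScanStep (st : Int × Int × Int × Option Char) (c : Char) : Int × Int × Int × Option Char :=
  let next :=
    if st.2.2.2 = some c then (st.2.1, st.2.2.1 + 1, st.2.2.2)
    else ((if st.2.2.1 = 2 then st.2.1 + 1 else st.2.1), (1 : Int), some c)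
  ((if next.2.1 > st.1 then next.2.1 else st.1), next)

-- one case of B: sort the prefix, scan adjacent runs, one boolean decision
def pvCaseB (n : Int) (s : String) : String :=
  match pvGetChars s (PySem.List.pyRange 0 n 1) with
  | none => "No"        -- IndexError (n > len(s)); excluded by Pre_
  | some pre =>
    let chars := PySem.List.sorted pre (fun c => c)
    let st := chars.foldl pvScanStep (0, 0, 0, none)
    let longest := st.1
    let pairs := if st.2.2.1 = 2 then st.2.1 + 1 else st.2.1
    if longest > 2 || (longest == 2 && ((PySem.Str.pyGet? s 0 != PySem.Str.pyGet? s (-1)) || decide (pairs ≥ 2)))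
    then "Yes" else "No"

def ourfunc_alt (t : Int) (test_cases : List (Int × String)) : List String :=
  test_cases.map (fun case => pvCaseB case.1 case.2)

-- ===== PRECONDITION & SPEC =====
-- exactly the inputs on which A returns: each case needs 1 ≤ n (else max({}) raises ValueError)
-- and n ≤ len(s) (else s[i] raises IndexError)
def Pre_ourfunc (t : Int) (test_cases : List (Int × String)) : Prop :=
  ∀ c ∈ test_cases, 1 ≤ c.1 ∧ c.1 ≤ (c.2.toList.length : Int)
instance (t : Int) (test_cases : List (Int × String)) : Decidable (Pre_ourfunc t test_cases) := by
  unfold Pre_ourfunc; infer_instance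

def pvWitness_ourfunc : Int × (List (Int × String)) := (1, [(3, "abca"), (2, "xx")])

def Spec_ourfunc (t : Int) (test_cases : List (Int × String)) (out : List String) : Prop := out = ourfunc_alt t test_cases
instance (t : Int) (test_cases : List (Int × String)) (out : List String) : Decidable (Spec_ourfunc t test_cases out) := by unfold Spec_ourfunc; infer_instance

-- ===== CLAIM (what is proved, stated in full; the proofs are below) =====
def Claim_equal_ourfunc : Prop := ∀ (t : Int) (test_cases : List (Int × String)), Dom_ourfunc t test_cases → Pre_ourfunc t test_cases → Spec_ourfunc t test_cases (ourfunc t test_cases)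

-- ===== LEMMAS AND PROOFS =====

-- the common reference value both per-case programs are reduced to
def pvRef (n : Int) (s : String) : String :=
  let l0 := s.toList.take n.toNat
  let cnts := (PySem.List.dedup l0).map (fun c => (l0.count c : Int))
  let M := cnts.foldl max 0
  if M > 2 then "Yes"
  else if M = 2 then
    if PySem.Str.pyGet? s 0 ≠ PySem.Str.pyGet? s (-1) then "Yes"
    else if 1 < cnts.count 2 then "Yes" else "No"
  else "No"

def pvCnts (l : List Char) : List Int := (PySem.List.dedup l).map (fun c => (l.count c : Int))
def pvM (l : List Char) : Int := (pvCnts l).foldl max 0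
def pvP (l : List Char) : Int := ((pvCnts l).count 2 : Int)

-- ---------- A side ----------

-- A's loop body is Counter's step
lemma pvBodyA_eq (d : PySem.Dict Char Int) (c : Char) :
    (if d.contains c then d.modify c 0 (· + 1) else d.insert c 1) = d.modify c 0 (· + 1) := by
  by_cases h : d.contains c = true
  · simp [h]
  · simp only [Bool.not_eq_true] at h
    simp [h, PySem.Dict.modify]
    rw [PySem.Dict.getD_of_not_contains d 0 h]
    norm_num

-- A's counting loop over range(n) builds Counter(s[:n]) when 0 ≤ n ≤ len(s)
lemma pvDictA_eq (n : Int) (s : String) (h1 : 0 ≤ n) (h2 : n ≤ (s.toList.length : Int)) :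
    (PySem.List.pyRange 0 n 1).foldl (pvStepA s) PySem.Dict.empty
    = PySem.Dict.counter (s.toList.take n.toNat) := by
  set l := s.toList.take n.toNat with hl
  have hlen : l.length = n.toNat := by
    rw [hl, List.length_take]; omega
  have hstep : (PySem.List.pyRange 0 n 1).foldl (pvStepA s) PySem.Dict.empty
    = (PySem.List.pyRange 0 n 1).foldl
      (fun (d : PySem.Dict Char Int) i => d.modify (PySem.List.pyGetD l i 'a') 0 (· + 1))
      PySem.Dict.empty := by
    apply PySem.List.foldl_congr_mem
    intro acc i hi
    rw [PySem.List.mem_pyRange_one] at hi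
    obtain ⟨hi0, hin⟩ := hi
    obtain ⟨k, rfl⟩ := Int.eq_ofNat_of_zero_le hi0
    have hk : k < l.length := by omega
    have hks : k < s.toList.length := by omega
    have hget : PySem.Str.pyGet? s (k : Int) = some l[k] := by
      rw [PySem.Str.pyGet?_natCast]
      simp [hl, List.getElem?_eq_getElem hks, List.getElem_take]
    have hgd : PySem.List.pyGetD l (k : Int) 'a' = l[k] := by
      rw [PySem.List.pyGetD_natCast]
      simp [List.getElem?_eq_getElem hk]
    simp only [pvStepA, hget, hgd]
    exact pvBodyA_eq acc l[k]
  rw [hstep]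
  have hn : n = PySem.List.len l := by simp [PySem.List.len, hlen]; omega
  rw [hn, PySem.Dict.counter_eq_foldl]
  exact PySem.List.foldl_pyRange_zero_pyGetD l 'a'
        (fun (d : PySem.Dict Char Int) c => d.modify c 0 (· + 1)) PySem.Dict.empty

-- A's cascade over Counter(l0) is the reference decision
set_option maxRecDepth 4096 in
lemma pvCaseA_eq_ref (n : Int) (s : String) (h1 : 1 ≤ n) (h2 : n ≤ (s.toList.length : Int)) :
    pvCaseA n s = pvRef n s := by
  have hd := pvDictA_eq n s (by omega) h2
  set l := s.toList.take n.toNat with hl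
  have hlen : l.length = n.toNat := by rw [hl, List.length_take]; omega
  have hvals : (PySem.Dict.counter l).values = pvCnts l := by
    simp [PySem.Dict.values, PySem.Dict.items_counter, pvCnts]
  have hitems : ((PySem.Dict.counter l).items.filter (fun p => p.2 == 2)).length
      = (pvCnts l).count 2 := by
    rw [PySem.Dict.items_counter, List.filter_map]
    simp only [pvCnts, PySem.List.dedup_eq_ofList, List.length_map, List.count_eq_countP,
      List.countP_map]
    rw [← List.countP_eq_length_filter]
    apply List.countP_congr
    intro x _
    rfl
  -- l is nonempty, so pvCnts l = v :: vs with 0 ≤ v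
  have hlne : l ≠ [] := by
    intro h; rw [h] at hlen; simp at hlen; omega
  obtain ⟨v, vs, hcv⟩ : ∃ v vs, pvCnts l = v :: vs := by
    unfold pvCnts
    cases hm : PySem.List.dedup l with
    | nil =>
      exfalso
      obtain ⟨x, hx⟩ := List.exists_mem_of_ne_nil l hlne
      have : x ∈ PySem.List.dedup l := by
        rw [PySem.List.dedup_eq_ofList, PySem.Set.mem_ofList]; exact hx
      rw [hm] at this; simp at this
    | cons d ds => exact ⟨_, _, rfl⟩
  have hv0 : 0 ≤ v := by
    have : v ∈ pvCnts l := by rw [hcv]; simp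
    unfold pvCnts at this
    obtain ⟨c, _, rfl⟩ := List.mem_map.1 this
    positivity
  have hmax : PySem.List.max? (pvCnts l) id = some ((pvCnts l).foldl max 0) := by
    rw [hcv]
    have : (v :: vs).foldl max 0 = vs.foldl max v := by
      simp only [List.foldl_cons]
      congr 1
      omega
    rw [this]
    exact PySem.List.max?_id_cons v vs
  simp only [pvCaseA, hd, hvals, hmax, List.length_map, hitems]
  simp only [pvRef, ← hl]
  rfl

-- ---------- B side ----------

-- collecting s[i] for i in range(n) yields the prefix when 0 ≤ n ≤ len(s)
lemma pvGetChars_range' (s : String) :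
    ∀ (cnt a : Nat), a + cnt ≤ s.toList.length →
    pvGetChars s ((List.range' a cnt).map (fun k : Nat => (k : Int)))
      = some (((s.toList.drop a)).take cnt) := by
  intro cnt
  induction cnt with
  | zero => intro a _; simp [pvGetChars]
  | succ m ih =>
    intro a h
    have ha : a < s.toList.length := by omega
    rw [List.range'_succ]
    simp only [List.map_cons, pvGetChars]
    rw [PySem.Str.pyGet?_natCast, List.getElem?_eq_getElem ha, ih (a + 1) (by omega)]
    rw [List.drop_eq_getElem_cons ha, List.take_succ_cons]

lemma pvGetChars_eq (n : Int) (s : String) (h1 : 0 ≤ n) (h2 : n ≤ (s.toList.length : Int)) :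
    pvGetChars s (PySem.List.pyRange 0 n 1) = some (s.toList.take n.toNat) := by
  obtain ⟨m, rfl⟩ : ∃ m : Nat, n = (m : Int) := ⟨n.toNat, by omega⟩
  rw [PySem.List.pyRange_zero_natCast, List.range_eq_range', Int.toNat_natCast]
  have := pvGetChars_range' s m 0 (by omega)
  rw [List.drop_zero] at this
  exact this

-- run structure of the sorted list: Set.add / dedup over a leading block
lemma pvAdd_cons (sl : List Char) (c x : Char) (hx : x ≠ c) :
    PySem.Set.add (c :: sl) x = c :: PySem.Set.add sl x := by
  simp [PySem.Set.add, PySem.Set.contains, hx]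
  split <;> simp

lemma pvFoldlAdd_cons (t : List Char) (c : Char) (hc : c ∉ t) :
    ∀ sl : List Char, t.foldl PySem.Set.add (c :: sl) = c :: t.foldl PySem.Set.add sl := by
  induction t with
  | nil => intro sl; simp
  | cons x xs ih =>
    intro sl
    simp only [List.foldl_cons]
    rw [pvAdd_cons sl c x (by simp at hc; tauto)]
    exact ih (by simp at hc; tauto) _

lemma pvFoldlAdd_replicate (k : Nat) (c : Char) :
    ∀ sl : List Char, PySem.Set.contains sl c = true →
    (List.replicate k c).foldl PySem.Set.add sl = sl := by
  induction k with
  | zero => intro sl _; simp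
  | succ m ih =>
    intro sl h
    rw [List.replicate_succ]
    simp only [List.foldl_cons]
    have hmem : c ∈ sl := by simpa [PySem.Set.contains] using h
    have : PySem.Set.add sl c = sl := by simp [PySem.Set.add, PySem.Set.contains, hmem]
    rw [this]
    exact ih sl h

lemma pvDedup_rep_append (k : Nat) (c : Char) (t : List Char) (hk : 1 ≤ k) (hc : c ∉ t) :
    PySem.List.dedup (List.replicate k c ++ t) = c :: PySem.List.dedup t := by
  obtain ⟨m, rfl⟩ : ∃ m, k = m + 1 := ⟨k - 1, by omega⟩
  rw [PySem.List.dedup_eq_ofList, PySem.List.dedup_eq_ofList,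
      PySem.Set.ofList_eq_foldl, PySem.Set.ofList_eq_foldl,
      List.foldl_append, List.replicate_succ]
  simp only [List.foldl_cons]
  have h0 : PySem.Set.add ([] : List Char) c = [c] := by simp [PySem.Set.add, PySem.Set.contains]
  rw [h0, pvFoldlAdd_replicate m c [c] (by simp [PySem.Set.contains])]
  exact pvFoldlAdd_cons t c hc []

lemma pvCnts_rep_append (k : Nat) (c : Char) (t : List Char) (hk : 1 ≤ k) (hc : c ∉ t) :
    pvCnts (List.replicate k c ++ t) = (k : Int) :: pvCnts t := by
  unfold pvCnts
  rw [pvDedup_rep_append k c t hk hc, List.map_cons]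
  congr 1
  · rw [List.count_append, List.count_replicate]
    simp [List.count_eq_zero_of_not_mem hc]
  · apply List.map_congr_left
    intro x hx
    have hxt : x ∈ t := by
      rw [PySem.List.dedup_eq_ofList, PySem.Set.mem_ofList] at hx; exact hx
    have hxc : ¬ (c == x) = true := by
      simp only [beq_iff_eq]; intro h; exact hc (h ▸ hxt)
    rw [List.count_append, List.count_replicate]
    simp [hxc]

lemma pvM_rep_append (k : Nat) (c : Char) (t : List Char) (hk : 1 ≤ k) (hc : c ∉ t) :
    pvM (List.replicate k c ++ t) = max (k : Int) (pvM t) := by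
  unfold pvM
  rw [pvCnts_rep_append k c t hk hc]
  simp only [List.foldl_cons]
  have h1 : max 0 (k : Int) = max (k : Int) 0 := max_comm _ _
  rw [h1, List.foldl_assoc]

lemma pvP_rep_append (k : Nat) (c : Char) (t : List Char) (hk : 1 ≤ k) (hc : c ∉ t) :
    pvP (List.replicate k c ++ t) = (if (k : Int) = 2 then 1 else 0) + pvP t := by
  unfold pvP
  rw [pvCnts_rep_append k c t hk hc, List.count_cons]
  push_cast
  have : ((k : Int) == 2) = decide ((k : Int) = 2) := by rfl
  split <;> split <;> simp_all <;> omega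

-- the finalisation applied after the scan loop
def pvFinish (st : Int × Int × Int × Option Char) : Int × Int :=
  (st.1, if st.2.2.1 = 2 then st.2.1 + 1 else st.2.1)

-- scanning j more copies of the current run's character
lemma pvScan_rep_same (c : Char) :
    ∀ (j : Nat) (m p r : Int), r ≤ m →
    (List.replicate j c).foldl pvScanStep (m, p, r, some c) = (max m (r + j), p, r + j, some c) := by
  intro j
  induction j with
  | zero => intro m p r h; simp; omega
  | succ i ih =>
    intro m p r h
    rw [List.replicate_succ]
    simp only [List.foldl_cons]
    have hstep : pvScanStep (m, p, r, some c) c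
        = (max m (r + 1), p, r + 1, some c) := by
      simp [pvScanStep]
      split <;> omega
    rw [hstep, ih (max m (r + 1)) p (r + 1) (le_max_right _ _)]
    simp only [Prod.mk.injEq]
    push_cast
    and_intros <;> first | trivial | omega

-- scanning a whole fresh run of k copies of c
lemma pvScan_rep_start (c : Char) (k : Nat) (hk : 1 ≤ k) (m p r : Int) (prev : Option Char)
    (hprev : prev ≠ some c) :
    (List.replicate k c).foldl pvScanStep (m, p, r, prev)
      = (max m (k : Int), p + (if r = 2 then 1 else 0), (k : Int), some c) := by
  obtain ⟨i, rfl⟩ : ∃ i, k = i + 1 := ⟨k - 1, by omega⟩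
  rw [List.replicate_succ]
  simp only [List.foldl_cons]
  have hstep : pvScanStep (m, p, r, prev) c
      = (max m 1, p + (if r = 2 then 1 else 0), 1, some c) := by
    simp [pvScanStep, hprev]
    constructor
    · split <;> omega
    · split <;> omega
  rw [hstep, pvScan_rep_same c i (max m 1) _ 1 (le_max_right _ _)]
  simp only [Prod.mk.injEq]
  push_cast
  and_intros <;> first | trivial | omega

lemma pvDropWhile_not_head (p : Char → Bool) (l : List Char) (d : Char) (t' : List Char)
    (h : l.dropWhile p = d :: t') : p d = false := by
  induction l with
  | nil => simp [List.dropWhile] at h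
  | cons x xs ih =>
    rw [List.dropWhile_cons] at h
    split at h
    · exact ih h
    · cases h
      simpa using ‹¬ p d = true›

-- the scan over a sorted list computes (max count, #counts = 2)
lemma pvScan_spec :
    ∀ (N : Nat) (l : List Char), l.length ≤ N → l.Pairwise (· ≤ ·) →
    ∀ (m p r : Int) (prev : Option Char), 0 ≤ m →
    (∀ x ∈ l, ∀ q, prev = some q → q < x) →
    pvFinish (l.foldl pvScanStep (m, p, r, prev))
      = (max m (pvM l), p + (if r = 2 then 1 else 0) + pvP l) := by
  intro N
  induction N with
  | zero =>
    intro l hlen _ m p r prev hm _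
    have : l = [] := by cases l <;> simp_all
    subst this
    simp [pvFinish, pvM, pvP, pvCnts, PySem.List.dedup_eq_ofList, PySem.Set.ofList]
    omega
  | succ N ih =>
    intro l hlen hpw m p r prev hm hprev
    cases hl : l with
    | nil =>
      simp [pvFinish, pvM, pvP, pvCnts, PySem.List.dedup_eq_ofList, PySem.Set.ofList]
      omega
    | cons c rest =>
      subst hl
      -- split the leading run of c
      set tw := (c :: rest).takeWhile (fun x => x == c) with htw
      set t := (c :: rest).dropWhile (fun x => x == c) with ht
      have hrep : tw = List.replicate tw.length c := by
        apply List.eq_replicate_of_mem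
        intro b hb
        have := List.mem_takeWhile_imp hb
        simpa using this
      set k := tw.length with hkdef
      have hsplit : c :: rest = List.replicate k c ++ t := by
        rw [← hrep, htw, ht, List.takeWhile_append_dropWhile]
      have hk1 : 1 ≤ k := by
        rw [hkdef, htw]
        simp [List.takeWhile_cons]
      have hle : ∀ x ∈ t, c ≤ x := by
        intro x hx
        have hxs : x ∈ rest := by
          have hsub : t.Sublist rest := by
            rw [ht]
            simpa [List.dropWhile_cons] using (List.dropWhile_sublist (l := rest) (fun x => x == c))
          exact hsub.mem hx
        exact (List.pairwise_cons.1 hpw).1 x hxs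
      have hpwt : t.Pairwise (· ≤ ·) := by
        have hsub : t.Sublist (c :: rest) := by rw [ht]; exact List.dropWhile_sublist _
        exact hpw.sublist hsub
      have hct : c ∉ t := by
        intro hc
        cases ht2 : t with
        | nil => rw [ht2] at hc; simp at hc
        | cons d t' =>
          have hpd : (d == c) = false := pvDropWhile_not_head _ (c :: rest) d t' (by rw [← ht, ht2])
          rw [ht2] at hc
          rcases List.mem_cons.1 hc with hcd | hc'
          · rw [← hcd] at hpd; simp at hpd
          · have h1 : d ≤ c := (List.pairwise_cons.1 (ht2 ▸ hpwt)).1 c hc'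
            have h2 : c ≤ d := hle d (by rw [ht2]; simp)
            have : d = c := le_antisymm h1 h2
            rw [this] at hpd; simp at hpd
      have hlt : ∀ x ∈ t, c < x := by
        intro x hx
        exact lt_of_le_of_ne (hle x hx) (fun h => hct (h ▸ hx))
      have hlent : t.length ≤ N := by
        have := congrArg List.length hsplit
        simp only [List.length_cons, List.length_append, List.length_replicate] at this hlen
        omega
      have hprevc : prev ≠ some c := by
        intro h
        have := hprev c (by simp) c h
        exact absurd rfl (ne_of_gt this)
      rw [hsplit, List.foldl_append, pvScan_rep_start c k hk1 m p r prev hprevc]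
      rw [ih t hlent hpwt (max m (k : Int)) _ (k : Int) (some c)
            (le_trans (by positivity) (le_max_right _ _))
            (by intro x hx q hq; cases hq; exact hlt x hx)]
      rw [pvM_rep_append k c t hk1 hct, pvP_rep_append k c t hk1 hct]
      rw [max_assoc, add_assoc]

-- counts are permutation-invariant
lemma pvCnts_perm (l l' : List Char) (h : l.Perm l') : (pvCnts l).Perm (pvCnts l') := by
  unfold pvCnts
  have hd : (PySem.List.dedup l).Perm (PySem.List.dedup l') := by
    rw [PySem.List.dedup_eq_ofList, PySem.List.dedup_eq_ofList]
    rw [List.perm_ext_iff_of_nodup (PySem.Set.nodup_ofList l) (PySem.Set.nodup_ofList l')]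
    intro a
    rw [PySem.Set.mem_ofList, PySem.Set.mem_ofList]
    exact h.mem_iff
  have hcong : (PySem.List.dedup l).map (fun c => (l.count c : Int))
      = (PySem.List.dedup l).map (fun c => (l'.count c : Int)) := by
    apply List.map_congr_left
    intro x _
    rw [h.count_eq]
  rw [hcong]
  exact hd.map _

lemma pvM_perm (l l' : List Char) (h : l.Perm l') : pvM l = pvM l' :=
  (pvCnts_perm l l' h).foldl_eq 0

lemma pvP_perm (l l' : List Char) (h : l.Perm l') : pvP l = pvP l' := by
  unfold pvP
  rw [(pvCnts_perm l l' h).count_eq]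

-- B's case computation is the reference decision
lemma pvCaseB_eq_ref (n : Int) (s : String) (h1 : 1 ≤ n) (h2 : n ≤ (s.toList.length : Int)) :
    pvCaseB n s = pvRef n s := by
  set l0 := s.toList.take n.toNat with hl0
  set chars := PySem.List.sorted l0 (fun c => c) with hch
  have hperm : chars.Perm l0 := PySem.List.sorted_perm l0 (fun c => c) false
  have hscan := pvScan_spec chars.length chars (le_refl _)
      (PySem.List.sorted_pairwise l0 (fun c => c)) 0 0 0 none (le_refl 0)
      (by intro x _ q hq; cases hq)
  have hM0 : (0 : Int) ≤ pvM chars := (PySem.List.le_foldl_max (pvCnts chars) 0).1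
  have hMv : max 0 (pvM chars) = pvM l0 := by
    rw [max_eq_right hM0]; exact pvM_perm chars l0 hperm
  have hPv : (0 : Int) + (if (0:Int) = 2 then 1 else 0) + pvP chars = pvP l0 := by
    simp; exact pvP_perm chars l0 hperm
  rw [hMv, hPv] at hscan
  set st := chars.foldl pvScanStep (0, 0, 0, none) with hst
  have h1' : st.1 = pvM l0 := congrArg Prod.fst hscan
  have h2' : (if st.2.2.1 = 2 then st.2.1 + 1 else st.2.1) = pvP l0 := congrArg Prod.snd hscan
  simp only [pvCaseB, pvGetChars_eq n s (by omega) h2, ← hl0, ← hch, ← hst, h1', h2']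
  -- compare the single boolean with the cascade
  simp only [pvRef, ← hl0]
  have hPc : pvP l0 = (((PySem.List.dedup l0).map (fun c => (l0.count c : Int))).count 2 : Int) := rfl
  have hMc : pvM l0 = ((PySem.List.dedup l0).map (fun c => (l0.count c : Int))).foldl max 0 := rfl
  rw [hPc, hMc]
  set cnts := (PySem.List.dedup l0).map (fun c => (l0.count c : Int)) with hcnts
  set M := cnts.foldl max 0 with hMdef
  by_cases hgt : M > 2
  · simp [hgt]
  · by_cases heq : M = 2
    · by_cases hne : PySem.List.pyGet? s.toList 0 = PySem.List.pyGet? s.toList (-1)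
      · by_cases hcnt : 1 < cnts.count 2
        · have h2 : ((cnts.count 2 : Int) ≥ 2) := by exact_mod_cast hcnt
          simp [hgt, heq, hne, hcnt, h2]
        · have h2 : ¬ ((cnts.count 2 : Int) ≥ 2) := by push_cast; omega
          simp [hgt, heq, hne, hcnt, h2]
      · simp [hgt, heq, hne, bne_iff_ne]
    · simp [hgt, heq]

-- ===== VERDICT (by name: the statement is the Claim_ definition above) =====
theorem ourfunc_spec : Claim_equal_ourfunc := by
  intro t tcs _ hpre
  unfold Spec_ourfunc ourfunc ourfunc_alt
  rw [PySem.List.foldl_append_singleton_eq_map]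
  simp only [List.nil_append]
  apply List.map_congr_left
  intro c hc
  rw [pvCaseA_eq_ref c.1 c.2 (hpre c hc).1 (hpre c hc).2,
      pvCaseB_eq_ref c.1 c.2 (hpre c hc).1 (hpre c hc).2]
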